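-- pv_equiv track=rewrite | github.com/DataSciencePolimi/CSSforPolitics | ExtractMentions.py | is_eligible
-- ===== SOURCE A (Python) =====
-- def is_eligible(tweet):
--     res = False
--
--     if "api_res" in tweet:
--         #to check the existence of tweets posted by bots, or tweets no longer active
--         return res
--
--     if "tw_full" not in tweet:
--         #full text content of tweet
--         return res
--
--     words = tweet["tw_full"].split(" ")
--     for word in words:
--         if word == "":
--             continue
--         if word[0] == "@":
--             res = True
--             break
--
--     return res
-- ===== SOURCE B (Python) =====
-- def is_eligible(tweet):
--     if "api_res" in tweet:
--         return False
--     text = tweet.get("tw_full")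
--     if text is None:
--         return False
--     return text.startswith("@") or " @" in text
-- ===== Notes on version B (the rewrite author's own statement) =====
-- stated objective: simpler
-- what changed: Replaces the split-on-space tokenization and per-word loop with two direct string tests: the text starts with '@' or contains ' @'.
import Mathlib
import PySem

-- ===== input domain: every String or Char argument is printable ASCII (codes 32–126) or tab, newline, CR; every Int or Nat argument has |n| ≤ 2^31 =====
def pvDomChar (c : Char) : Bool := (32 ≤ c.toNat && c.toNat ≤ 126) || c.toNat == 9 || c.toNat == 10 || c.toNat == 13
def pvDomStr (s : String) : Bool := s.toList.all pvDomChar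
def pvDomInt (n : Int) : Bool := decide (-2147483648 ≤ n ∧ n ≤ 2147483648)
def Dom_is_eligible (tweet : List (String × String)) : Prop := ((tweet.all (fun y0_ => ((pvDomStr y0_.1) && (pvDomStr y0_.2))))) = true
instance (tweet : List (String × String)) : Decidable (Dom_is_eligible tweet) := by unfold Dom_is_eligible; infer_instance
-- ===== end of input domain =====

-- B replaces A's split-on-space tokenization and per-word loop by two direct tests on the raw
-- text (starts with '@', or contains ' @'); objective: simpler.

-- ===== PORT A =====
-- the for-loop over the words, with the 'continue' on empty words and the 'break' on a hit
def isEligibleLoopA : List String → Bool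
  | [] => false
  | w :: rest =>
    if w = "" then isEligibleLoopA rest
    else if PySem.Str.pyGet? w 0 = some '@' then true
    else isEligibleLoopA rest

def is_eligible (tweet : List (String × String)) : Bool :=
  let d := PySem.Dict.mk tweet
  if d.contains "api_res" then false
  else if !(d.contains "tw_full") then false
  else
    -- tweet["tw_full"]: contains was just checked, so get? is some; split(" ") with sep ≠ "" is some
    let words := (PySem.Str.split? ((d.get? "tw_full").getD "") " ").getD []
    isEligibleLoopA words

-- ===== PORT B =====
def is_eligible_alt (tweet : List (String × String)) : Bool :=
  let d := PySem.Dict.mk tweet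
  if d.contains "api_res" then false
  else
    match d.get? "tw_full" with
    | none => false
    | some text => PySem.Str.startswith text "@" || PySem.Str.isIn " @" text

-- ===== PRECONDITION & SPEC =====
def Spec_is_eligible (tweet : List (String × String)) (out : Bool) : Prop := out = is_eligible_alt tweet
instance (tweet : List (String × String)) (out : Bool) : Decidable (Spec_is_eligible tweet out) := by unfold Spec_is_eligible; infer_instance

-- ===== CLAIM (what is proved, stated in full; the proofs are below) =====
def Claim_equal_is_eligible : Prop := ∀ (tweet : List (String × String)), Dom_is_eligible tweet → Spec_is_eligible tweet (is_eligible tweet)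

-- ===== LEMMAS AND PROOFS =====

-- spec model of cs.split(" ") on char lists
def mySplit : List Char → List (List Char)
  | [] => [[]]
  | c :: t => if c = ' ' then [] :: mySplit t
              else (c :: (mySplit t).headI) :: (mySplit t).tail

theorem mySplit_ne_nil (cs : List Char) : mySplit cs ≠ [] := by
  cases cs with
  | nil => simp [mySplit]
  | cons c t => unfold mySplit; split <;> simp

theorem mySplit_space (t : List Char) : mySplit (' ' :: t) = [] :: mySplit t := by
  simp [mySplit]

theorem mySplit_nonspace (c : Char) (t : List Char) (hc : c ≠ ' ') :
    mySplit (c :: t) = (c :: (mySplit t).headI) :: (mySplit t).tail := by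
  simp [mySplit, hc]

theorem splitOn_go_spec : ∀ (fuel : Nat) (l cur : List Char) (acc : List (List Char)),
    l.length < fuel →
    PySem.Chars.splitOn.go [' '] fuel l cur acc
      = acc.reverse ++ ((cur.reverse ++ (mySplit l).headI) :: (mySplit l).tail) := by
  intro fuel
  induction fuel with
  | zero => intro l cur acc h; omega
  | succ f ih =>
    intro l cur acc h
    cases l with
    | nil =>
      simp [PySem.Chars.splitOn.go, mySplit]
    | cons c rest =>
      by_cases hc : c = ' '
      · subst hc
        rw [show PySem.Chars.splitOn.go [' '] (f+1) (' ' :: rest) cur acc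
              = PySem.Chars.splitOn.go [' '] f rest [] (cur.reverse :: acc) by
            simp [PySem.Chars.splitOn.go, List.isPrefixOf]]
        rw [ih rest [] (cur.reverse :: acc) (by simpa using Nat.lt_of_succ_lt_succ h)]
        rcases hne : mySplit rest with _ | ⟨w, ws⟩
        · exact absurd hne (mySplit_ne_nil rest)
        · simp [mySplit, hne]
      · rw [show PySem.Chars.splitOn.go [' '] (f+1) (c :: rest) cur acc
              = PySem.Chars.splitOn.go [' '] f rest (c :: cur) acc by
            have hbeq : (' ' == c) = false := by
              simp only [beq_eq_false_iff_ne, ne_eq]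
              exact fun h => hc h.symm
            simp [PySem.Chars.splitOn.go, List.isPrefixOf, hbeq]]
        rw [ih rest (c :: cur) acc (by simpa using Nat.lt_of_succ_lt_succ h)]
        rcases hne : mySplit rest with _ | ⟨w, ws⟩
        · exact absurd hne (mySplit_ne_nil rest)
        · simp [mySplit, hc, hne]

theorem splitOn_eq_mySplit (cs : List Char) :
    PySem.Chars.splitOn cs [' '] = mySplit cs := by
  have := splitOn_go_spec (cs.length + 1) cs [] [] (by omega)
  rw [PySem.Chars.splitOn, this]
  rcases hne : mySplit cs with _ | ⟨w, ws⟩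
  · exact absurd hne (mySplit_ne_nil cs)
  · simp

-- A's loop, on char lists
def goAChars : List (List Char) → Bool
  | [] => false
  | w :: rest =>
    if w = [] then goAChars rest
    else if w[0]? = some '@' then true
    else goAChars rest

theorem loopA_eq_goAChars (ws : List String) :
    isEligibleLoopA ws = goAChars (ws.map String.toList) := by
  induction ws with
  | nil => rfl
  | cons w rest ih =>
    by_cases hw : w = ""
    · subst hw
      simpa [isEligibleLoopA, goAChars] using ih
    · have hwl : ¬ w.toList = [] := by cases w; simp_all
      have h2 : PySem.Str.pyGet? w 0 = w.toList[0]? := by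
        simpa using PySem.Str.pyGet?_natCast w (0 : Nat)
      simp only [isEligibleLoopA, goAChars, List.map, if_neg hw, if_neg hwl, h2, ih]

theorem isIn_cons (sub : List Char) (c : Char) (t : List Char) :
    PySem.Chars.isIn sub (c :: t) = (decide (sub <+: (c :: t)) || PySem.Chars.isIn sub t) := by
  rw [Bool.eq_iff_iff]
  simp [PySem.Chars.isIn_iff_infix, List.infix_cons_iff]

theorem key_lemma (cs : List Char) :
    goAChars (mySplit cs) = (PySem.Chars.startswith cs ['@'] || PySem.Chars.isIn [' ', '@'] cs)
    ∧ goAChars ((mySplit cs).tail) = PySem.Chars.isIn [' ', '@'] cs := by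
  induction cs with
  | nil => constructor <;> decide
  | cons c t ih =>
    obtain ⟨ihA, ihB⟩ := ih
    have hsw : ∀ u : List Char, PySem.Chars.startswith u ['@'] = decide (['@'] <+: u) := by
      intro u; rw [Bool.eq_iff_iff]; simp [PySem.Chars.startswith_iff]
    have hB : goAChars ((mySplit (c :: t)).tail) = PySem.Chars.isIn [' ', '@'] (c :: t) := by
      by_cases hc : c = ' '
      · subst hc
        rw [isIn_cons]
        have hpre : (decide ([' ', '@'] <+: (' ' :: t)) : Bool) = decide (['@'] <+: t) := by
          simp [List.cons_prefix_cons]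
        rw [mySplit_space, List.tail_cons, hpre, ihA, hsw t]
      · rw [isIn_cons]
        have hpre : decide ([' ', '@'] <+: (c :: t)) = false := by
          simp [List.cons_prefix_cons]; intro h; exact absurd h.symm hc
        rw [mySplit_nonspace c t hc, List.tail_cons, hpre, Bool.false_or]
        exact ihB
    refine ⟨?_, hB⟩
    by_cases hc : c = ' '
    · subst hc
      rw [isIn_cons]
      have hpre : (decide ([' ', '@'] <+: (' ' :: t)) : Bool) = decide (['@'] <+: t) := by
        simp [List.cons_prefix_cons]
      rw [mySplit_space]
      show goAChars (mySplit t) = _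
      have hsw0 : PySem.Chars.startswith (' ' :: t) ['@'] = false := by
        rw [hsw]; simp [List.cons_prefix_cons]
      rw [hpre, ihA, hsw t, hsw0, Bool.false_or]
    · have hsw' : PySem.Chars.startswith (c :: t) ['@'] = decide (c = '@') := by
        rw [hsw, Bool.eq_iff_iff]
        simp [List.cons_prefix_cons, eq_comm]
      by_cases hat : c = '@'
      · subst hat
        rw [mySplit_nonspace _ t hc]
        simp [goAChars, hsw']
      · rw [mySplit_nonspace c t hc]
        show (if (c :: (mySplit t).headI) = [] then _ else if (c :: (mySplit t).headI)[0]? = some '@' then _ else goAChars (mySplit t).tail) = _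
        rw [if_neg (by simp), List.getElem?_cons_zero,
          if_neg (by simp [hat])]
        have htail : (mySplit (c :: t)).tail = (mySplit t).tail := by
          rw [mySplit_nonspace c t hc]
          rfl
        rw [← htail, hB, hsw', Bool.eq_iff_iff]
        simp [hat]

theorem main_text_lemma (t : String) :
    isEligibleLoopA ((PySem.Str.split? t " ").getD [])
      = (PySem.Str.startswith t "@" || PySem.Str.isIn " @" t) := by
  have hsplit : PySem.Str.split? t " " = some ((PySem.Chars.splitOn t.toList [' ']).map String.ofList) := by
    simp [PySem.Str.split?, PySem.Chars.split?]
  rw [hsplit]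
  simp only [Option.getD_some]
  rw [loopA_eq_goAChars]
  have hmm : ((PySem.Chars.splitOn t.toList [' ']).map String.ofList).map String.toList
      = PySem.Chars.splitOn t.toList [' '] := by
    simp [List.map_map, Function.comp_def]
  rw [hmm, splitOn_eq_mySplit]
  have := (key_lemma t.toList).1
  rw [this]
  have h1 : PySem.Str.startswith t "@" = PySem.Chars.startswith t.toList ['@'] := by
    simp
  have h2 : PySem.Str.isIn " @" t = PySem.Chars.isIn [' ', '@'] t.toList := by
    simp
  rw [h1, h2]

-- ===== VERDICT (by name: the statement is the Claim_ definition above) =====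
theorem is_eligible_spec : Claim_equal_is_eligible := by
  intro tweet _
  unfold Spec_is_eligible is_eligible is_eligible_alt
  set d := PySem.Dict.mk tweet with hd
  by_cases h1 : d.contains "api_res"
  · simp [h1]
  · simp only [h1, Bool.false_eq_true, if_false]
    rcases hg : d.get? "tw_full" with _ | t
    · have hc : d.contains "tw_full" = false := by
        rw [PySem.Dict.contains_eq_isSome_get?, hg]; rfl
      simp [hc]
    · have hc : d.contains "tw_full" = true := by
        rw [PySem.Dict.contains_eq_isSome_get?, hg]; rfl
      simp only [hc, Bool.not_true, Bool.false_eq_true, if_false, Option.getD_some]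
      exact main_text_lemma t
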